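-- pv_equiv track=rewrite | github.com/victor-ibm/QAOA-graph-decomposition | graph_scheduling/QAOA/create_qaoa_circuit_with_penalty.py | find_best_pair
-- ===== SOURCE A (Python) =====
-- from typing import List
--
-- def find_best_pair(pairs: List, num_ops: List) -> List:
--     """
--     Given a list of pairs, and another list of the number of Rzz gates which have already been
--     applied to each qubit, this function finds the pair of qubits [q1, q2] which have the lowest-
--     maximum number of Rzz gates.
--
--     E.g.
--     pairs = [[0, 1], [2, 3]]
--     num_ops = [1, 6, 3, 2]
--
--     The maximum number of Rzz gates acting on either qubit in the pair [0, 1] is 6, and for the pair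
--     [2, 3] is 3, so [2, 3] is returned.
--
--     Args:
--         pairs (List): A list of pairs of qubits (each one a two-element list) on which Rzz gates
--         need to be applied.
--         num_ops (List): The number of Rzz gates which have already been applied to each qubit
--         (ordered by qubit index)
--     Returns:
--         pair (List): The pair of qubits on which to add the next Rzz gate.
--     """
--
--     depths = [0] * len(pairs)
--     for i in range(len(pairs)):
--         pair = pairs[i]
--         depth = max(num_ops[pair[0]], num_ops[pair[1]])
--         depths[i] = depth
--
--     pair = pairs[depths.index(min(depths))]
--
--     return pair
-- ===== SOURCE B (Python) =====
-- def find_best_pair(pairs, num_ops):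
--     # Stable sort keeps the first pair among ties, matching A's depths.index(min(depths)).
--     return sorted(pairs, key=lambda p: max(num_ops[p[0]], num_ops[p[1]]))[0]
-- ===== Notes on version B (the rewrite author's own statement) =====
-- stated objective: alternative
-- what changed: Instead of building a parallel depths list and scanning it twice (min then .index), B stably sorts the pairs by their depth key and returns the first element; stability reproduces A's first-minimum tie-breaking.
import Mathlib
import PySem

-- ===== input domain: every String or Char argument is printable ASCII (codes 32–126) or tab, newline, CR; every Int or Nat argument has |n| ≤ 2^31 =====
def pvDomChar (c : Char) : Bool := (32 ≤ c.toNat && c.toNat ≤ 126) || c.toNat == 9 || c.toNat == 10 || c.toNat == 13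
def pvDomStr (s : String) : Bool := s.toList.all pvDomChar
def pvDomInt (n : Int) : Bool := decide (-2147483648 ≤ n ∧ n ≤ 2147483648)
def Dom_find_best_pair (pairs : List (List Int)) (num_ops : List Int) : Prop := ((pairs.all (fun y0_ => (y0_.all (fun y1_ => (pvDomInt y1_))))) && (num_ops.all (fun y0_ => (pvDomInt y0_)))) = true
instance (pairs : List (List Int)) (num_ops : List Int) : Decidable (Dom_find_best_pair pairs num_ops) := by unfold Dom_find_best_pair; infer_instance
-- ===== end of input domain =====

-- B replaces A's depths-list construction and double scan (min then .index) by a stable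
-- sort of the pairs by their depth key followed by taking the first element; stability
-- reproduces A's first-minimum tie-breaking. Same return value; B is not claimed faster.

-- ===== PORT A =====
-- depth of one pair (the loop body's `max(num_ops[pair[0]], num_ops[pair[1]])`)
def pairDepth (num_ops : List Int) (pair : List Int) : Int :=
  max (PySem.List.pyGetD num_ops (PySem.List.pyGetD pair 0 0) 0)
      (PySem.List.pyGetD num_ops (PySem.List.pyGetD pair 1 0) 0)

def find_best_pair (pairs : List (List Int)) (num_ops : List Int) : List Int :=
  -- depths = [0] * len(pairs); for i in range(len(pairs)): depths[i] = max(...)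
  let depths : List Int :=
    (PySem.List.pyRange 0 (pairs.length : Int) 1).foldl
      (fun depths i =>
        let pair := PySem.List.pyGetD pairs i []
        let depth := pairDepth num_ops pair
        PySem.List.pySetD depths i depth)
      (List.replicate pairs.length 0)
  -- pair = pairs[depths.index(min(depths))]
  match PySem.List.min? depths (fun x => x) with
  | none => []            -- min([]) raises in Python; excluded by Pre_
  | some m =>
    match PySem.List.index? depths m with
    | none => []          -- unreachable: m ∈ depths
    | some k => PySem.List.pyGetD pairs (k : Int) []

-- ===== PORT B =====
-- return sorted(pairs, key=lambda p: max(num_ops[p[0]], num_ops[p[1]]))[0]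
-- (the key lambda is textually A's loop-body expression, so the pairDepth helper is shared)
def find_best_pair_alt (pairs : List (List Int)) (num_ops : List Int) : List Int :=
  (PySem.List.pyGet? (PySem.List.sorted pairs (pairDepth num_ops)) 0).getD []
  -- [0] on the empty sort result raises in Python; excluded by Pre_

-- ===== PRECONDITION & SPEC =====
-- Pre_ excludes exactly the inputs where Python A raises: empty `pairs` (min of empty
-- sequence), a pair shorter than 2 (IndexError on pair[1]), or a pair entry that is not a
-- valid (possibly negative) index into num_ops (IndexError).
def Pre_find_best_pair (pairs : List (List Int)) (num_ops : List Int) : Prop :=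
  pairs ≠ [] ∧ ∀ p ∈ pairs, 2 ≤ p.length ∧
    (-(num_ops.length : Int) ≤ p.getD 0 0 ∧ p.getD 0 0 < (num_ops.length : Int)) ∧
    (-(num_ops.length : Int) ≤ p.getD 1 0 ∧ p.getD 1 0 < (num_ops.length : Int))
instance (pairs : List (List Int)) (num_ops : List Int) : Decidable (Pre_find_best_pair pairs num_ops) := by unfold Pre_find_best_pair; infer_instance

def pvWitness_find_best_pair : List (List Int) × List Int := ([[0, 1], [2, 3]], [1, 6, 3, 2])

def Spec_find_best_pair (pairs : List (List Int)) (num_ops : List Int) (out : List Int) : Prop := out = find_best_pair_alt pairs num_ops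
instance (pairs : List (List Int)) (num_ops : List Int) (out : List Int) : Decidable (Spec_find_best_pair pairs num_ops out) := by unfold Spec_find_best_pair; infer_instance

-- ===== CLAIM (what is proved, stated in full; the proofs are below) =====
def Claim_equal_find_best_pair : Prop := ∀ (pairs : List (List Int)) (num_ops : List Int), Dom_find_best_pair pairs num_ops → Pre_find_best_pair pairs num_ops → Spec_find_best_pair pairs num_ops (find_best_pair pairs num_ops)

-- ===== LEMMAS AND PROOFS =====

-- The depths loop writes F xs[i] into slot i of a same-length zero list: it builds xs.map F.
theorem loop_take_invariant {β : Type} (xs : List β) (F : β → Int) (d0 : β) (k : Nat)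
    (hk : k ≤ xs.length) :
    (PySem.List.pyRange 0 (k : Int) 1).foldl
      (fun d i => PySem.List.pySetD d i (F (PySem.List.pyGetD xs i d0)))
      (List.replicate xs.length 0)
    = (xs.take k).map F ++ List.replicate (xs.length - k) 0 := by
  induction k with
  | zero => simp
  | succ k ih =>
    rw [show ((k+1 : Nat) : Int) = (k : Int) + 1 by push_cast; ring,
        PySem.List.pyRange_one_succ_right (by omega), List.foldl_append, ih (by omega)]
    simp only [List.foldl_cons, List.foldl_nil]
    have hkl : k < xs.length := by omega
    have hget : PySem.List.pyGetD xs (k : Int) d0 = xs[k] := by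
      simp [PySem.List.pyGetD_natCast, List.getD, hkl]
    have hlen : ((xs.take k).map F).length = k := by simp; omega
    have hrep : List.replicate (xs.length - k) (0:Int)
        = 0 :: List.replicate (xs.length - (k+1)) 0 := by
      rw [show xs.length - k = (xs.length - (k+1)) + 1 by omega, List.replicate_succ]
    rw [hget, hrep, PySem.List.pySetD, PySem.List.pySet?_natCast _ k _ (by simp; omega)]
    simp only [Option.getD_some]
    have hset : ((xs.take k).map F ++ 0 :: List.replicate (xs.length - (k+1)) 0).set k (F xs[k])
        = (xs.take k).map F ++ F xs[k] :: List.replicate (xs.length - (k+1)) 0 := by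
      rw [List.set_append, if_neg (by omega)]
      rw [hlen]
      simp
    rw [hset]
    have htake : List.take (k+1) (List.map F xs) = List.take k (List.map F xs) ++ [F xs[k]] := by
      rw [List.take_add_one]
      simp [hkl]
    simp [htake]

theorem depths_eq_map {β : Type} (xs : List β) (F : β → Int) (d0 : β) :
    (PySem.List.pyRange 0 (xs.length : Int) 1).foldl
      (fun d i => PySem.List.pySetD d i (F (PySem.List.pyGetD xs i d0)))
      (List.replicate xs.length 0)
    = xs.map F := by
  have := loop_take_invariant xs F d0 xs.length (le_refl _)
  simpa using this

-- insertBy into a nonempty list: the head is the strictly better of x and the old head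
theorem insertBy_cons {α : Type} (bef : α → α → Bool) (x y : α) (ys : List α) :
    PySem.List.insertBy bef x (y :: ys)
    = if bef x y then x :: y :: ys else y :: PySem.List.insertBy bef x ys := by
  rfl

-- the head of a run of insertions is the left fold keeping the strictly-better element
theorem head_foldl_insertBy {α : Type} (bef : α → α → Bool) (xs : List α) :
    ∀ (y : α) (ys : List α),
    (xs.foldl (fun acc x => PySem.List.insertBy bef x acc) (y :: ys)).head?
    = some (xs.foldl (fun h x => if bef x h then x else h) y) := by
  induction xs with
  | nil => intro y ys; rfl
  | cons x xs ih =>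
    intro y ys
    simp only [List.foldl_cons, insertBy_cons]
    cases hxy : bef x y with
    | true => simp only [if_true, ih]
    | false => simp only [Bool.false_eq_true, if_false, ih]

-- head of the stable sort of a nonempty list = fold keeping the first strict minimum
theorem head_sorted {α : Type} (key : α → Int) (x : α) (t : List α) :
    (PySem.List.sorted (x :: t) key).head?
    = some (t.foldl (fun h z => if key z < key h then z else h) x) := by
  rw [PySem.List.sorted_eq_foldl_insertBy]
  simp only [List.foldl_cons]
  have h0 : PySem.List.insertBy (fun a b => decide (key a < key b)) x [] = [x] := rfl
  rw [h0, head_foldl_insertBy]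
  simp only [decide_eq_true_eq]

-- min? of a nonempty list is the same fold
theorem min?_cons_fold {α : Type} (key : α → Int) (x : α) (t : List α) :
    PySem.List.min? (x :: t) key
    = some (t.foldl (fun h z => if key z < key h then z else h) x) := by
  show List.foldl _ (some x) t = _
  induction t generalizing x with
  | nil => rfl
  | cons z t ih =>
    simp only [List.foldl_cons]
    by_cases hz : key z < key x
    · simp only [hz, if_true, ih]
    · simp only [hz, if_false, ih]

-- pyGet? at index 0 is head?
theorem pyGet?_zero {α : Type} (xs : List α) : PySem.List.pyGet? xs 0 = xs.head? := by
  cases xs <;> simp [PySem.List.pyGet?, PySem.List.pyIdx?]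

-- min?'s fold keeps its accumulator when nothing beats it strictly
theorem foldl_min_stays {α : Type} (f : α → Int) (m : α) (t : List α)
    (h : ∀ y ∈ t, f m ≤ f y) :
    t.foldl (fun acc x => match acc with
      | none => some x
      | some m => if f x < f m then some x else some m) (some m) = some m := by
  induction t with
  | nil => rfl
  | cons b t ih =>
    have hb : ¬ f b < f m := not_lt.mpr (h b (by simp))
    simp only [List.foldl_cons, hb]
    exact ih (fun y hy => h y (by simp [hy]))

-- min?'s fold lands on the first global minimum of the tail (when it beats the accumulator)
theorem foldl_min_first {α : Type} (f : α → Int) (t : List α) (k : Nat) (a : α)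
    (hk : k < t.length)
    (hmin : ∀ y ∈ t, f (t[k]) ≤ f y)
    (ha : f (t[k]) < f a)
    (hfirst : ∀ j (hj : j < k), f (t[k]) < f (t[j]'(by omega))) :
    t.foldl (fun acc x => match acc with
      | none => some x
      | some m => if f x < f m then some x else some m) (some a) = some t[k] := by
  induction t generalizing a k with
  | nil => simp at hk
  | cons b t ih =>
    cases k with
    | zero =>
      simp only [List.getElem_cons_zero] at hmin ha ⊢
      simp only [List.foldl_cons, if_pos ha]
      exact foldl_min_stays f b t (fun y hy => hmin y (by simp [hy]))
    | succ k =>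
      have hk' : k < t.length := by simpa using hk
      have hb : f ((b :: t)[k+1]) < f b := hfirst 0 (by omega)
      simp only [List.getElem_cons_succ] at hmin ha hb ⊢
      simp only [List.foldl_cons]
      by_cases hba : f b < f a
      · rw [if_pos hba]
        exact ih k b hk' (fun y hy => hmin y (by simp [hy])) hb
          (fun j hj => by simpa using hfirst (j+1) (by omega))
      · rw [if_neg hba]
        exact ih k a hk' (fun y hy => hmin y (by simp [hy])) ha
          (fun j hj => by simpa using hfirst (j+1) (by omega))

-- first strict minimum characterisation of min?
theorem min?_eq_of_first_min {α : Type} (f : α → Int) (xs : List α) (k : Nat)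
    (hk : k < xs.length)
    (hmin : ∀ y ∈ xs, f (xs[k]) ≤ f y)
    (hfirst : ∀ j (hj : j < k), f (xs[k]) < f (xs[j]'(by omega))) :
    PySem.List.min? xs f = some xs[k] := by
  cases xs with
  | nil => simp at hk
  | cons b t =>
    unfold PySem.List.min?
    simp only [List.foldl_cons]
    cases k with
    | zero =>
      simp only [List.getElem_cons_zero] at hmin ⊢
      exact foldl_min_stays f b t (fun y hy => hmin y (by simp [hy]))
    | succ k =>
      have hk' : k < t.length := by simpa using hk
      have hb : f ((b :: t)[k+1]) < f b := hfirst 0 (by omega)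
      simp only [List.getElem_cons_succ] at hmin hb ⊢
      exact foldl_min_first f t k b hk' (fun y hy => hmin y (by simp [hy])) hb
        (fun j hj => by simpa using hfirst (j+1) (by omega))

-- ===== VERDICT (by name: the statement is the Claim_ definition above) =====
theorem find_best_pair_spec : Claim_equal_find_best_pair := by
  intro pairs num_ops _hdom hpre
  unfold Spec_find_best_pair find_best_pair find_best_pair_alt
  obtain ⟨hne, -⟩ := hpre
  have hdep : (PySem.List.pyRange 0 (pairs.length : Int) 1).foldl
      (fun depths i => PySem.List.pySetD depths i (pairDepth num_ops (PySem.List.pyGetD pairs i [])))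
      (List.replicate pairs.length 0) = pairs.map (pairDepth num_ops) :=
    depths_eq_map pairs (pairDepth num_ops) []
  simp only [hdep]
  set ds := pairs.map (pairDepth num_ops) with hds
  have hdsne : ds ≠ [] := by simp [hds, hne]
  obtain ⟨m, hm⟩ : ∃ m, PySem.List.min? ds (fun x => x) = some m := by
    cases h : PySem.List.min? ds (fun x => x) with
    | none => exact absurd ((PySem.List.min?_eq_none_iff _ _).mp h) hdsne
    | some m => exact ⟨m, rfl⟩
  have hmem : m ∈ ds := PySem.List.min?_mem hm
  have hlow : ∀ y ∈ ds, m ≤ y := PySem.List.min?_isMin hm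
  obtain ⟨k, hk⟩ : ∃ k, PySem.List.index? ds m = some k := by
    cases h : PySem.List.index? ds m with
    | none => exact absurd ((PySem.List.index?_eq_none_iff _ _).mp h) (by exact fun hh => hh hmem)
    | some k => exact ⟨k, rfl⟩
  obtain ⟨hklt, hdk, hprev⟩ := PySem.List.getElem_of_index?_eq_some hk
  have hklt' : k < pairs.length := by simpa [hds] using hklt
  simp only [hm, hk]
  have hget : PySem.List.pyGetD pairs (k : Int) [] = pairs[k] := by
    simp [PySem.List.pyGetD_natCast, List.getD, hklt']
  have hdkval : ds[k] = pairDepth num_ops pairs[k] := by simp [hds]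
  have hBmin : PySem.List.min? pairs (pairDepth num_ops) = some pairs[k] := by
    apply min?_eq_of_first_min (pairDepth num_ops) pairs k hklt'
    · intro y hy
      have hyd : m ≤ pairDepth num_ops y := hlow _ (by rw [hds]; exact List.mem_map_of_mem hy)
      show pairDepth num_ops pairs[k] ≤ pairDepth num_ops y
      calc pairDepth num_ops pairs[k] = m := by rw [← hdkval, hdk]
        _ ≤ pairDepth num_ops y := hyd
    · intro j hj
      have hjlt : j < pairs.length := by omega
      have hjds : j < ds.length := by omega
      have hne' : ds[j] ≠ m := hprev j (by omega)
      have hlt : m < ds[j] := lt_of_le_of_ne (hlow _ (List.getElem_mem _)) (Ne.symm hne')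
      have hAj : ds[j] = pairDepth num_ops (pairs[j]'hjlt) := by simp [hds]
      show pairDepth num_ops pairs[k] < pairDepth num_ops (pairs[j]'hjlt)
      calc pairDepth num_ops pairs[k] = m := by rw [← hdkval, hdk]
        _ < ds[j] := hlt
        _ = pairDepth num_ops (pairs[j]'hjlt) := hAj
  -- B's sorted-head equals A's min? result
  have hheads : (PySem.List.sorted pairs (pairDepth num_ops)).head?
      = PySem.List.min? pairs (pairDepth num_ops) := by
    cases pairs with
    | nil => exact absurd rfl hne
    | cons p t => rw [head_sorted, min?_cons_fold]
  rw [hget, pyGet?_zero, hheads, hBmin, Option.getD_some]
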